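-- pv_equiv track=rewrite | github.com/lbwry782-star/ACE-Backend | engine/ace_engine.py | build_pre_intent_block
-- ===== SOURCE A (Python) =====
-- def build_pre_intent_block(product_name: str, product_description: str) -> str:
--     """
--     Build PRE-INTENT block from product information (deterministic text, no API calls).
--
--     Args:
--         product_name: Name of the product
--         product_description: Description of the product
--
--     Returns:
--         PRE-INTENT text block (3-5 lines max)
--     """
--     # Combine product info for analysis
--     combined_text = (product_name + " " + product_description).lower()
--
--     # CORE IDEA: Extract main concept from product name/description
--     # Simple keyword-based extraction (deterministic)
--     core_idea = product_name
--     if len(product_description) > 0: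
--         # Use first meaningful phrase from description
--         desc_words = product_description.split()[:10]  # First 10 words
--         core_idea = f"{product_name} ({' '.join(desc_words)})"
--
--     # CREATIVE TENSION: Identify one contrast (deterministic keyword matching)
--     tension = "innovation meets tradition"
--     if any(word in combined_text for word in ["fast", "speed", "quick", "rapid", "instant"]):
--         tension = "speed meets precision"
--     elif any(word in combined_text for word in ["safe", "secure", "protection", "shield"]):
--         tension = "strength meets elegance"
--     elif any(word in combined_text for word in ["fresh", "new", "clean", "pure"]):
--         tension = "purity meets power"
--     elif any(word in combined_text for word in ["comfort", "soft", "gentle", "cozy"]):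
--         tension = "comfort meets durability"
--     elif any(word in combined_text for word in ["precise", "accurate", "exact", "detailed"]):
--         tension = "precision meets simplicity"
--     else:
--         tension = "form meets function"
--
--     # VISUAL DIRECTION: What kind of visual logic we want
--     visual_direction = "clean, focused composition with strong silhouette definition"
--     if any(word in combined_text for word in ["hybrid", "merge", "combine", "fusion"]):
--         visual_direction = "seamless integration where boundaries dissolve into unified form"
--     elif any(word in combined_text for word in ["precise", "accurate", "exact"]):
--         visual_direction = "crisp, defined edges with clear geometric relationships"
--     elif any(word in combined_text for word in ["soft", "comfort", "gentle"]):
--         visual_direction = "organic flow with smooth transitions and natural curves"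
--
--     # ENVIRONMENT DIRECTION: Physical context cue (not decorative)
--     environment_direction = "realistic physical context that functionally justifies the composition"
--     if any(word in combined_text for word in ["desk", "office", "work", "professional"]):
--         environment_direction = "workspace or professional setting that explains functional purpose"
--     elif any(word in combined_text for word in ["home", "domestic", "household", "living"]):
--         environment_direction = "domestic environment that shows natural integration"
--     elif any(word in combined_text for word in ["outdoor", "nature", "natural", "environment"]):
--         environment_direction = "natural outdoor context that supports functional logic"
--     elif any(word in combined_text for word in ["water", "liquid", "fluid", "aquatic"]):
--         environment_direction = "aquatic or fluid environment that explains material interaction"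
--
--     # Build PRE-INTENT block
--     pre_intent = (
--         f"PRE-INTENT (interpretation before rendering):\n"
--         f"CORE IDEA: {core_idea}\n"
--         f"TENSION: {tension}\n"
--         f"VISUAL DIRECTION: {visual_direction}\n"
--         f"ENVIRONMENT DIRECTION: {environment_direction}"
--     )
--
--     return pre_intent
-- ===== SOURCE B (Python) =====
-- # B: instead of A's per-field per-keyword substring searches, one left-to-right
-- # scan of the combined text records every keyword that starts at each position
-- # (naive multi-pattern matching into a set); each field is then the first rule
-- # whose keywords intersect that set of matches.
--
-- _KEYWORDS = (
--     "fast", "speed", "quick", "rapid", "instant",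
--     "safe", "secure", "protection", "shield",
--     "fresh", "new", "clean", "pure",
--     "comfort", "soft", "gentle", "cozy",
--     "precise", "accurate", "exact", "detailed",
--     "hybrid", "merge", "combine", "fusion",
--     "desk", "office", "work", "professional",
--     "home", "domestic", "household", "living",
--     "outdoor", "nature", "natural", "environment",
--     "water", "liquid", "fluid", "aquatic",
-- )
--
-- _TENSION_RULES = [
--     (("fast", "speed", "quick", "rapid", "instant"), "speed meets precision"),
--     (("safe", "secure", "protection", "shield"), "strength meets elegance"),
--     (("fresh", "new", "clean", "pure"), "purity meets power"),
--     (("comfort", "soft", "gentle", "cozy"), "comfort meets durability"),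
--     (("precise", "accurate", "exact", "detailed"), "precision meets simplicity"),
-- ]
--
-- _VISUAL_RULES = [
--     (("hybrid", "merge", "combine", "fusion"),
--      "seamless integration where boundaries dissolve into unified form"),
--     (("precise", "accurate", "exact"),
--      "crisp, defined edges with clear geometric relationships"),
--     (("soft", "comfort", "gentle"),
--      "organic flow with smooth transitions and natural curves"),
-- ]
--
-- _ENVIRONMENT_RULES = [
--     (("desk", "office", "work", "professional"),
--      "workspace or professional setting that explains functional purpose"),
--     (("home", "domestic", "household", "living"),
--      "domestic environment that shows natural integration"),
--     (("outdoor", "nature", "natural", "environment"),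
--      "natural outdoor context that supports functional logic"),
--     (("water", "liquid", "fluid", "aquatic"),
--      "aquatic or fluid environment that explains material interaction"),
-- ]
--
--
-- def _found_keywords(text):
--     """One scan of the text: at each position, record every keyword starting there."""
--     found = set()
--     for i in range(len(text)):
--         for kw in _KEYWORDS:
--             if kw not in found and text.startswith(kw, i):
--                 found.add(kw)
--     return found
--
--
-- def _select(found, rules, default):
--     for keywords, result in rules:
--         if any(k in found for k in keywords):
--             return result
--     return default
--
--
-- def build_pre_intent_block(product_name: str, product_description: str) -> str:
--     combined_text = (product_name + " " + product_description).lower()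
--
--     core_idea = product_name
--     if len(product_description) > 0:
--         desc_words = product_description.split()[:10]
--         core_idea = f"{product_name} ({' '.join(desc_words)})"
--
--     found = _found_keywords(combined_text)
--
--     tension = _select(found, _TENSION_RULES, "form meets function")
--     visual_direction = _select(
--         found, _VISUAL_RULES,
--         "clean, focused composition with strong silhouette definition")
--     environment_direction = _select(
--         found, _ENVIRONMENT_RULES,
--         "realistic physical context that functionally justifies the composition")
--
--     return (
--         f"PRE-INTENT (interpretation before rendering):\n"
--         f"CORE IDEA: {core_idea}\n"
--         f"TENSION: {tension}\n"
--         f"VISUAL DIRECTION: {visual_direction}\n"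
--         f"ENVIRONMENT DIRECTION: {environment_direction}"
--     )
-- ===== Notes on version B (the rewrite author's own statement) =====
-- stated objective: alternative
-- what changed: B replaces A's per-field per-keyword substring searches by one left-to-right scan of the combined text that records every keyword starting at each position (naive multi-pattern matching into a set), then fills each field with the first rule whose keywords intersect that match set.
import Mathlib
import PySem

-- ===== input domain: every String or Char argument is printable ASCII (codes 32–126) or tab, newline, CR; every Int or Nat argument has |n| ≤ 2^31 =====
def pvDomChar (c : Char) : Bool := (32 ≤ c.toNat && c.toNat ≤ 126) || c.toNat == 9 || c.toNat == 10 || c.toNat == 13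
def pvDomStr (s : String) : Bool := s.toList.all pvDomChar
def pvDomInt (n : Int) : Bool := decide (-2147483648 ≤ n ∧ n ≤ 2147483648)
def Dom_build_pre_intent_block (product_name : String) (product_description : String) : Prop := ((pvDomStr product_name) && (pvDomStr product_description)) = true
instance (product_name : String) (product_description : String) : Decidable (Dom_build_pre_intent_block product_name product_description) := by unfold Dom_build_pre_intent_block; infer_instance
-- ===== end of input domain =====

-- B replaces A's per-field per-keyword substring searches by one left-to-right scan of the
-- combined text collecting every matched keyword into a set, then first-matching rule selection
-- (objective: alternative); same output on every input.

-- ===== PORT A =====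
def build_pre_intent_block (product_name : String) (product_description : String) : String :=
  let combined_text := PySem.Str.lower (product_name ++ " " ++ product_description)
  let core_idea :=
    if PySem.Str.len product_description > 0 then
      let desc_words := PySem.List.slice (PySem.Str.split₀ product_description) none (some 10)
      product_name ++ " (" ++ PySem.Str.join " " desc_words ++ ")"
    else product_name
  let tension :=
    if ["fast", "speed", "quick", "rapid", "instant"].any (fun w => PySem.Str.isIn w combined_text) then
      "speed meets precision"
    else if ["safe", "secure", "protection", "shield"].any (fun w => PySem.Str.isIn w combined_text) then
      "strength meets elegance"
    else if ["fresh", "new", "clean", "pure"].any (fun w => PySem.Str.isIn w combined_text) then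
      "purity meets power"
    else if ["comfort", "soft", "gentle", "cozy"].any (fun w => PySem.Str.isIn w combined_text) then
      "comfort meets durability"
    else if ["precise", "accurate", "exact", "detailed"].any (fun w => PySem.Str.isIn w combined_text) then
      "precision meets simplicity"
    else "form meets function"
  let visual_direction :=
    if ["hybrid", "merge", "combine", "fusion"].any (fun w => PySem.Str.isIn w combined_text) then
      "seamless integration where boundaries dissolve into unified form"
    else if ["precise", "accurate", "exact"].any (fun w => PySem.Str.isIn w combined_text) then
      "crisp, defined edges with clear geometric relationships"
    else if ["soft", "comfort", "gentle"].any (fun w => PySem.Str.isIn w combined_text) then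
      "organic flow with smooth transitions and natural curves"
    else "clean, focused composition with strong silhouette definition"
  let environment_direction :=
    if ["desk", "office", "work", "professional"].any (fun w => PySem.Str.isIn w combined_text) then
      "workspace or professional setting that explains functional purpose"
    else if ["home", "domestic", "household", "living"].any (fun w => PySem.Str.isIn w combined_text) then
      "domestic environment that shows natural integration"
    else if ["outdoor", "nature", "natural", "environment"].any (fun w => PySem.Str.isIn w combined_text) then
      "natural outdoor context that supports functional logic"
    else if ["water", "liquid", "fluid", "aquatic"].any (fun w => PySem.Str.isIn w combined_text) then
      "aquatic or fluid environment that explains material interaction"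
    else "realistic physical context that functionally justifies the composition"
  "PRE-INTENT (interpretation before rendering):\n" ++
    "CORE IDEA: " ++ core_idea ++ "\n" ++
    "TENSION: " ++ tension ++ "\n" ++
    "VISUAL DIRECTION: " ++ visual_direction ++ "\n" ++
    "ENVIRONMENT DIRECTION: " ++ environment_direction

-- ===== PORT B =====
def pvKeywords : List String :=
  [ "fast", "speed", "quick", "rapid", "instant",
    "safe", "secure", "protection", "shield",
    "fresh", "new", "clean", "pure",
    "comfort", "soft", "gentle", "cozy",
    "precise", "accurate", "exact", "detailed",
    "hybrid", "merge", "combine", "fusion",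
    "desk", "office", "work", "professional",
    "home", "domestic", "household", "living",
    "outdoor", "nature", "natural", "environment",
    "water", "liquid", "fluid", "aquatic" ]

def pvTensionRules : List (List String × String) :=
  [ (["fast", "speed", "quick", "rapid", "instant"], "speed meets precision"),
    (["safe", "secure", "protection", "shield"], "strength meets elegance"),
    (["fresh", "new", "clean", "pure"], "purity meets power"),
    (["comfort", "soft", "gentle", "cozy"], "comfort meets durability"),
    (["precise", "accurate", "exact", "detailed"], "precision meets simplicity") ]

def pvVisualRules : List (List String × String) :=
  [ (["hybrid", "merge", "combine", "fusion"],
      "seamless integration where boundaries dissolve into unified form"),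
    (["precise", "accurate", "exact"],
      "crisp, defined edges with clear geometric relationships"),
    (["soft", "comfort", "gentle"],
      "organic flow with smooth transitions and natural curves") ]

def pvEnvironmentRules : List (List String × String) :=
  [ (["desk", "office", "work", "professional"],
      "workspace or professional setting that explains functional purpose"),
    (["home", "domestic", "household", "living"],
      "domestic environment that shows natural integration"),
    (["outdoor", "nature", "natural", "environment"],
      "natural outdoor context that supports functional logic"),
    (["water", "liquid", "fluid", "aquatic"],
      "aquatic or fluid environment that explains material interaction") ]

-- one scan of the text: at each position i, record every keyword starting there
-- (hand port: Python's text.startswith(kw, i) is exactly startswith(text[i:], kw) for 0 ≤ i < len(text),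
--  the only i the loop produces; PySem has no offset startswith)
def pvScanStep (text : String) (found : PySem.Set String) (i : Int) : PySem.Set String :=
  pvKeywords.foldl
    (fun f kw =>
      if !(PySem.Set.contains f kw) && PySem.Str.startswith (PySem.Str.slice text (some i) none) kw then
        PySem.Set.add f kw
      else f)
    found

def pvFoundKeywords (text : String) : PySem.Set String :=
  (PySem.List.pyRange 0 (PySem.Str.len text) 1).foldl (pvScanStep text) PySem.Set.empty

def pvSelect (found : PySem.Set String) : List (List String × String) → String → String
  | [], dflt => dflt
  | (keywords, result) :: rest, dflt =>
      if keywords.any (fun k => PySem.Set.contains found k) then result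
      else pvSelect found rest dflt

def build_pre_intent_block_alt (product_name : String) (product_description : String) : String :=
  let combined_text := PySem.Str.lower (product_name ++ " " ++ product_description)
  let core_idea :=
    if PySem.Str.len product_description > 0 then
      let desc_words := PySem.List.slice (PySem.Str.split₀ product_description) none (some 10)
      product_name ++ " (" ++ PySem.Str.join " " desc_words ++ ")"
    else product_name
  let found := pvFoundKeywords combined_text
  let tension := pvSelect found pvTensionRules "form meets function"
  let visual_direction := pvSelect found pvVisualRules
      "clean, focused composition with strong silhouette definition"
  let environment_direction := pvSelect found pvEnvironmentRules
      "realistic physical context that functionally justifies the composition"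
  "PRE-INTENT (interpretation before rendering):\n" ++
    "CORE IDEA: " ++ core_idea ++ "\n" ++
    "TENSION: " ++ tension ++ "\n" ++
    "VISUAL DIRECTION: " ++ visual_direction ++ "\n" ++
    "ENVIRONMENT DIRECTION: " ++ environment_direction

-- ===== PRECONDITION & SPEC =====
def Spec_build_pre_intent_block (product_name : String) (product_description : String) (out : String) : Prop := out = build_pre_intent_block_alt product_name product_description
instance (product_name : String) (product_description : String) (out : String) : Decidable (Spec_build_pre_intent_block product_name product_description out) := by unfold Spec_build_pre_intent_block; infer_instance

-- ===== CLAIM (what is proved, stated in full; the proofs are below) =====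
def Claim_equal_build_pre_intent_block : Prop := ∀ (product_name : String) (product_description : String), Dom_build_pre_intent_block product_name product_description → Spec_build_pre_intent_block product_name product_description (build_pre_intent_block product_name product_description)

-- ===== LEMMAS AND PROOFS =====

-- membership after one add-if-matched pass over a keyword list
lemma mem_foldl_addIf (cond : String → Bool) (ks : List String) (found : PySem.Set String)
    (kw : String) :
    kw ∈ ks.foldl
        (fun f k => if !(PySem.Set.contains f k) && cond k then PySem.Set.add f k else f) found
      ↔ kw ∈ found ∨ (kw ∈ ks ∧ cond kw = true) := by
  induction ks generalizing found with
  | nil => simp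
  | cons k rest ih =>
      have hstep : ∀ f : PySem.Set String,
          kw ∈ (if !(PySem.Set.contains f k) && cond k then PySem.Set.add f k else f)
            ↔ kw ∈ f ∨ (kw = k ∧ cond k = true) := by
        intro f
        by_cases hc : PySem.Set.contains f k = true
        · have hkf : k ∈ f := (PySem.Set.contains_iff f k).mp hc
          rw [if_neg (by rw [hc]; simp)]
          constructor
          · exact Or.inl
          · rintro (h | ⟨rfl, -⟩) <;> [exact h; exact hkf]
        · by_cases hcond : cond k = true
          · rw [if_pos (by simp at hc; simp [hc, hcond]),
              PySem.Set.mem_add]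
            constructor
            · rintro (h | rfl) <;> [exact Or.inl h; exact Or.inr ⟨rfl, hcond⟩]
            · rintro (h | ⟨rfl, -⟩) <;> [exact Or.inl h; exact Or.inr rfl]
          · rw [if_neg (by simp [hcond])]
            constructor
            · exact Or.inl
            · rintro (h | ⟨rfl, h⟩) <;> [exact h; exact absurd h hcond]
      rw [List.foldl_cons, ih, hstep found]
      simp only [List.mem_cons]
      constructor
      · rintro ((h | ⟨rfl, hck⟩) | ⟨h, hc2⟩)
        · exact Or.inl h
        · exact Or.inr ⟨Or.inl rfl, hck⟩
        · exact Or.inr ⟨Or.inr h, hc2⟩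
      · rintro (h | ⟨(rfl | h), hc2⟩)
        · exact Or.inl (Or.inl h)
        · exact Or.inl (Or.inr ⟨rfl, hc2⟩)
        · exact Or.inr ⟨h, hc2⟩

lemma mem_scanStep (text : String) (i : Int) (found : PySem.Set String) (kw : String) :
    kw ∈ pvScanStep text found i
      ↔ kw ∈ found ∨ (kw ∈ pvKeywords ∧
          PySem.Str.startswith (PySem.Str.slice text (some i) none) kw = true) := by
  unfold pvScanStep
  exact mem_foldl_addIf _ _ found kw

-- the first n positions of the scan find exactly the keywords occurring at some j < n
lemma mem_scan_range (text : String) (n : Nat) (kw : String) :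
    kw ∈ ((List.range n).map (fun (k : Nat) => (k : Int))).foldl (pvScanStep text) PySem.Set.empty
      ↔ kw ∈ pvKeywords ∧ ∃ j < n, kw.toList <+: text.toList.drop j := by
  induction n with
  | zero => simp [PySem.Set.empty]
  | succ n ih =>
      rw [List.range_succ, List.map_append, List.foldl_append]
      simp only [List.map_cons, List.map_nil, List.foldl_cons, List.foldl_nil]
      rw [mem_scanStep, ih]
      have hsw : PySem.Str.startswith (PySem.Str.slice text (some (n : Int)) none) kw = true
          ↔ kw.toList <+: text.toList.drop n := by
        rw [show PySem.Str.startswith (PySem.Str.slice text (some (n : Int)) none) kw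
              = PySem.Chars.startswith (PySem.Str.slice text (some (n : Int)) none).toList kw.toList
            from by simp [pysem]]
        rw [PySem.Str.toList_slice, PySem.Chars.slice_eq_listSlice,
          PySem.List.slice_from_natCast]
        exact PySem.Chars.startswith_iff _ _
      constructor
      · rintro (⟨hkws, j, hj, hpre⟩ | ⟨hkws, hsw'⟩)
        · exact ⟨hkws, j, Nat.lt_succ_of_lt hj, hpre⟩
        · exact ⟨hkws, n, Nat.lt_succ_self n, hsw.mp hsw'⟩
      · rintro ⟨hkws, j, hj, hpre⟩
        rcases Nat.lt_succ_iff_lt_or_eq.mp hj with hj' | rfl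
        · exact Or.inl ⟨hkws, j, hj', hpre⟩
        · exact Or.inr ⟨hkws, hsw.mpr hpre⟩

lemma mem_found_iff (text : String) (kw : String) (hkw : kw ∈ pvKeywords) :
    kw ∈ pvFoundKeywords text ↔ PySem.Str.isIn kw text = true := by
  have hne : kw.toList ≠ [] := by fin_cases hkw <;> decide
  unfold pvFoundKeywords
  rw [show PySem.Str.len text = ((text.toList.length : Nat) : Int) from by simp [pysem],
    PySem.List.pyRange_zero_natCast]
  have h1 := mem_scan_range text text.toList.length kw
  rw [h1,
    show PySem.Str.isIn kw text = PySem.Chars.isIn kw.toList text.toList from by simp [pysem],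
    ← PySem.Chars.exists_prefix_drop_iff_isIn]
  constructor
  · rintro ⟨-, j, -, hpre⟩
    exact ⟨j, hpre⟩
  · rintro ⟨j, hpre⟩
    refine ⟨hkw, j, ?_, hpre⟩
    by_contra hj
    have : text.toList.drop j = [] := List.drop_eq_nil_of_le (by omega)
    rw [this, List.prefix_nil] at hpre
    exact hne hpre

lemma contains_found (text : String) (kw : String) (hkw : kw ∈ pvKeywords) :
    PySem.Set.contains (pvFoundKeywords text) kw = PySem.Str.isIn kw text := by
  by_cases hb : PySem.Str.isIn kw text = true
  · rw [hb]
    exact (PySem.Set.contains_iff _ _).mpr ((mem_found_iff text kw hkw).mpr hb)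
  · rw [Bool.eq_false_iff.mpr hb]
    exact Bool.eq_false_iff.mpr fun hc =>
      hb ((mem_found_iff text kw hkw).mp ((PySem.Set.contains_iff _ _).mp hc))

lemma any_contains_found {text : String} (ks : List String)
    (h : ∀ k ∈ ks, k ∈ pvKeywords) :
    ks.any (fun k => PySem.Set.contains (pvFoundKeywords text) k)
      = ks.any (fun k => PySem.Str.isIn k text) :=
  PySem.List.any_congr_mem (fun x hx => contains_found text x (h x hx))

-- ===== VERDICT (by name: the statement is the Claim_ definition above) =====
theorem build_pre_intent_block_spec : Claim_equal_build_pre_intent_block := by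
  intro product_name product_description _
  unfold Spec_build_pre_intent_block build_pre_intent_block build_pre_intent_block_alt
  simp only [pvSelect, pvTensionRules, pvVisualRules, pvEnvironmentRules,
    any_contains_found ["fast", "speed", "quick", "rapid", "instant"] (by decide),
    any_contains_found ["safe", "secure", "protection", "shield"] (by decide),
    any_contains_found ["fresh", "new", "clean", "pure"] (by decide),
    any_contains_found ["comfort", "soft", "gentle", "cozy"] (by decide),
    any_contains_found ["precise", "accurate", "exact", "detailed"] (by decide),
    any_contains_found ["hybrid", "merge", "combine", "fusion"] (by decide),
    any_contains_found ["precise", "accurate", "exact"] (by decide),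
    any_contains_found ["soft", "comfort", "gentle"] (by decide),
    any_contains_found ["desk", "office", "work", "professional"] (by decide),
    any_contains_found ["home", "domestic", "household", "living"] (by decide),
    any_contains_found ["outdoor", "nature", "natural", "environment"] (by decide),
    any_contains_found ["water", "liquid", "fluid", "aquatic"] (by decide)]
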